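-- pv_equiv track=rewrite | github.com/hgedawy/15110-S25-Demos | Week11/Lect19/Code/untitled4.py | simpleSubseqMatch
-- ===== SOURCE A (Python) =====
-- def simpleSubseqMatch(sequence, subseq):
--     c = 0
--     a = len(subseq)
--     for i in range(len(sequence)):
--         if sequence[i] == subseq[0]:
--             if sequence[i:i + a] == subseq:
--                 c += 1
--     return c
-- ===== SOURCE B (Python) =====
-- def simpleSubseqMatch(sequence, subseq):
--     c = 0
--     i = sequence.find(subseq)
--     while i != -1:
--         c += 1
--         i = sequence.find(subseq, i + 1)
--     return c
-- ===== Notes on version B (the rewrite author's own statement) =====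
-- stated objective: faster
-- what changed: Replaces A's per-index first-char test plus slice comparison with a loop that jumps between matches via str.find(subseq, i+1), counting the same overlapping occurrences.
-- outside the precondition, e.g. on simpleSubseqMatch('', ''): A returns 0, B returns 1
import Mathlib
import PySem

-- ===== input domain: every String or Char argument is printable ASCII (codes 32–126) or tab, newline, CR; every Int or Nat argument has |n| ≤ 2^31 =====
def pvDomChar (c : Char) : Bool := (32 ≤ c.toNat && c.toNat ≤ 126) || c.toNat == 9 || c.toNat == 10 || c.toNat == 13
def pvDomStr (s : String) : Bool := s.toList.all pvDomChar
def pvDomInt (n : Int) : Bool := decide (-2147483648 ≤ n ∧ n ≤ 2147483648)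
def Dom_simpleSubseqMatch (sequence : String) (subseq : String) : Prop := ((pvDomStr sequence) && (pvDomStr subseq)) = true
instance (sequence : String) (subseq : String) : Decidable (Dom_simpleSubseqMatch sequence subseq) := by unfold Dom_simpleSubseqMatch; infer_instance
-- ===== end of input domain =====

-- B replaces A's per-index slice comparison with a str.find jump loop (C-level search in Python,
-- counting the same overlapping matches); objective: faster by a constant factor.

-- ===== PORT A =====
def simpleSubseqMatch (sequence : String) (subseq : String) : Int :=
  -- c = 0; a = len(subseq); for i in range(len(sequence)): if sequence[i]==subseq[0]: if sequence[i:i+a]==subseq: c += 1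
  (PySem.List.pyRange 0 (sequence.toList.length : Int) 1).foldl
    (fun c i =>
      if PySem.List.pyGet? sequence.toList i = PySem.List.pyGet? subseq.toList 0 then
        if PySem.List.slice sequence.toList (some i) (some (i + (subseq.toList.length : Int)))
            = subseq.toList then c + 1 else c
      else c) 0

-- ===== PORT B =====
-- the while loop: current find result i, counter c; fuel bounds the (finite) iteration count
def altGo (s sub : List Char) : Nat → Int → Int → Int
  | 0, _, c => c
  | fuel + 1, i, c =>
      if i = -1 then c
      else altGo s sub fuel (PySem.Chars.findFrom s sub (i + 1) none) (c + 1)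

def simpleSubseqMatch_alt (sequence : String) (subseq : String) : Int :=
  altGo sequence.toList subseq.toList (sequence.toList.length + 2)
    (PySem.Chars.find sequence.toList subseq.toList) 0

-- ===== PRECONDITION & SPEC =====
-- Pre_ excludes subseq = "": A evaluates subseq[0], an IndexError whenever sequence ≠ "";
-- on the remaining corner ("", "") A returns 0 but B returns 1 (Python's own convention,
-- "".count("") == 1), an accident of A's empty loop.
def Pre_simpleSubseqMatch (sequence : String) (subseq : String) : Prop := subseq ≠ ""
instance (sequence : String) (subseq : String) : Decidable (Pre_simpleSubseqMatch sequence subseq) := by unfold Pre_simpleSubseqMatch; infer_instance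
def pvWitness_simpleSubseqMatch : String × String := ("abcabca", "abca")

def Spec_simpleSubseqMatch (sequence : String) (subseq : String) (out : Int) : Prop := out = simpleSubseqMatch_alt sequence subseq
instance (sequence : String) (subseq : String) (out : Int) : Decidable (Spec_simpleSubseqMatch sequence subseq out) := by unfold Spec_simpleSubseqMatch; infer_instance

-- ===== CLAIM (what is proved, stated in full; the proofs are below) =====
def Claim_equal_simpleSubseqMatch : Prop := ∀ (sequence : String) (subseq : String), Dom_simpleSubseqMatch sequence subseq → Pre_simpleSubseqMatch sequence subseq → Spec_simpleSubseqMatch sequence subseq (simpleSubseqMatch sequence subseq)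

-- ===== LEMMAS AND PROOFS =====

-- number of match positions i ≥ k : sub is a prefix of s.drop i
def mc (s sub : List Char) (k : Nat) : Nat :=
  (List.range' k (s.length - k)).countP (fun i => decide (sub <+: List.drop i s))

lemma mc_ge (s sub : List Char) (k : Nat) (h : s.length ≤ k) : mc s sub k = 0 := by
  simp [mc, Nat.sub_eq_zero_of_le h]

lemma mc_succ (s sub : List Char) (k : Nat) (h : k < s.length) :
    mc s sub k = (if sub <+: List.drop k s then 1 else 0) + mc s sub (k + 1) := by
  unfold mc
  rw [show s.length - k = (s.length - (k+1)) + 1 by omega, List.range'_succ, List.countP_cons]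
  by_cases hp : sub <+: List.drop k s <;> simp [hp, Nat.add_comm]

lemma mc_le (s sub : List Char) (k : Nat) : mc s sub k ≤ s.length - k :=
  le_trans List.countP_le_length (by simp)

lemma infix_iff_exists_drop (sub t : List Char) : sub <:+: t ↔ ∃ d, sub <+: List.drop d t := by
  constructor
  · rintro ⟨a, b, rfl⟩
    refine ⟨a.length, b, ?_⟩
    simp
  · rintro ⟨d, u, hu⟩
    exact ⟨t.take d, u, by rw [List.append_assoc, hu, List.take_append_drop]⟩

lemma mc_zero_of_no_infix (s sub : List Char) (k : Nat) (h : ¬ sub <:+: List.drop k s) :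
    mc s sub k = 0 := by
  rw [mc, List.countP_eq_zero]
  intro i hi
  have hk : k ≤ i := (List.mem_range'_1.mp hi).1
  simp only [decide_eq_true_eq]
  intro hp
  refine h ((infix_iff_exists_drop sub _).mpr ⟨i - k, ?_⟩)
  rw [List.drop_drop, show k + (i - k) = i by omega]
  exact hp

lemma mc_skip (s sub : List Char) (k j : Nat) (hkj : k ≤ j)
    (hno : ∀ i, k ≤ i → i < j → ¬ sub <+: List.drop i s) : mc s sub k = mc s sub j := by
  induction j with
  | zero => have : k = 0 := by omega
            rw [this]
  | succ j ih =>
    rcases Nat.lt_or_ge k (j+1) with hlt | hge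
    · have hkj' : k ≤ j := by omega
      rw [ih hkj' (fun i h1 h2 => hno i h1 (by omega))]
      rcases Nat.lt_or_ge j s.length with hj | hj
      · rw [mc_succ s sub j hj, if_neg (hno j hkj' (by omega)), Nat.zero_add]
      · rw [mc_ge s sub j hj, mc_ge s sub (j+1) (by omega)]
    · have : k = j + 1 := by omega
      rw [this]

lemma altGo_eq (s sub : List Char) (hsub : sub ≠ []) :
    ∀ (fuel k : Nat) (c : Int), k ≤ s.length → mc s sub k < fuel →
      altGo s sub fuel (PySem.Chars.findFrom s sub (k : Int) none) c = c + (mc s sub k : Int) := by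
  intro fuel
  induction fuel with
  | zero => intro k c _ h; omega
  | succ fuel ih =>
    intro k c hk hfuel
    by_cases hj : PySem.Chars.findFrom s sub (k : Int) none = -1
    · have hni : ¬ sub <:+: List.drop k s :=
        (PySem.Chars.findFrom_natCast_eq_neg_one_iff s sub k hk).mp hj
      rw [altGo, if_pos hj, mc_zero_of_no_infix s sub k hni]
      simp
    · obtain ⟨hkj, hpref, hno⟩ := PySem.Chars.findFrom_natCast_spec s sub k hk hj
      set j := PySem.Chars.findFrom s sub (k : Int) none with hjdef
      have hj0 : 0 ≤ j := le_trans (by exact_mod_cast Nat.zero_le k) hkj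
      have hjn : j.toNat < s.length := by
        rcases hpref with ⟨u, hu⟩
        have hlen : sub.length + u.length = (List.drop j.toNat s).length := by
          rw [← hu]; simp
        have : 0 < sub.length := List.length_pos_iff.mpr hsub
        simp only [List.length_drop] at hlen
        omega
      have hkj' : k ≤ j.toNat := by omega
      have hskip : mc s sub k = mc s sub j.toNat := mc_skip s sub k j.toNat hkj' hno
      have hmcj : mc s sub j.toNat = 1 + mc s sub (j.toNat + 1) := by
        rw [mc_succ s sub j.toNat hjn, if_pos hpref]
      have hcast : j + 1 = ((j.toNat + 1 : Nat) : Int) := by omega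
      rw [altGo, if_neg hj, hcast,
        ih (j.toNat + 1) (c + 1) (by omega) (by omega), hskip, hmcj]
      push_cast
      ring

lemma toList_ne_nil (s : String) (h : s ≠ "") : s.toList ≠ [] := by
  intro hnil
  apply h
  simpa using congrArg String.ofList hnil

lemma portA_eq_mc (sequence subseq : String) (hsub : subseq ≠ "") :
    simpleSubseqMatch sequence subseq = (mc sequence.toList subseq.toList 0 : Int) := by
  unfold simpleSubseqMatch
  have hsub' : subseq.toList ≠ [] := toList_ne_nil subseq hsub
  set s := sequence.toList with hs
  set sub := subseq.toList with hsu
  have hbody : (fun (c : Int) (i : Int) =>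
      if PySem.List.pyGet? s i = PySem.List.pyGet? sub 0 then
        if PySem.List.slice s (some i) (some (i + (sub.length : Int))) = sub then c + 1 else c
      else c)
      = (fun (c : Int) (i : Int) =>
        if PySem.List.pyGet? s i = PySem.List.pyGet? sub 0 ∧
           PySem.List.slice s (some i) (some (i + (sub.length : Int))) = sub then c + 1 else c) := by
    funext c i
    by_cases h1 : PySem.List.pyGet? s i = PySem.List.pyGet? sub 0 <;>
      by_cases h2 : PySem.List.slice s (some i) (some (i + (sub.length : Int))) = sub <;>
      simp [h1, h2]
  rw [hbody, PySem.List.foldl_ite_add_one, PySem.List.pyRange_zero_natCast, List.countP_map]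
  rw [show mc s sub 0 = (List.range' 0 s.length).countP (fun i => decide (sub <+: List.drop i s)) by
    simp [mc]]
  rw [← List.range_eq_range', zero_add]
  norm_cast
  apply List.countP_congr
  intro i hi
  have hin : i < s.length := List.mem_range.mp hi
  simp only [Function.comp_apply, decide_eq_true_eq]
  have hslice : PySem.List.slice s (some (i : Int)) (some ((i : Int) + (sub.length : Int)))
      = (s.drop i).take sub.length := PySem.List.slice_natCast_add s i sub.length
  constructor
  · rintro ⟨_, h2⟩
    rw [hslice] at h2
    exact List.prefix_iff_eq_take.mpr h2.symm
  · intro hp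
    refine ⟨?_, by rw [hslice]; exact (List.prefix_iff_eq_take.mp hp).symm⟩
    rcases List.exists_cons_of_ne_nil hsub' with ⟨h, t, ht⟩
    rcases hp with ⟨u, hu⟩
    have hdrop : List.drop i s = h :: (t ++ u) := by rw [← hu, ht]; simp
    rw [PySem.List.pyGet?_natCast, show ((0 : Int)) = ((0 : Nat) : Int) by simp,
      PySem.List.pyGet?_natCast, ← List.head?_drop, hdrop, ht]
    simp

-- ===== VERDICT (by name: the statement is the Claim_ definition above) =====
theorem simpleSubseqMatch_spec : Claim_equal_simpleSubseqMatch := by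
  intro sequence subseq _ hpre
  unfold Spec_simpleSubseqMatch
  have hsub' : subseq.toList ≠ [] := toList_ne_nil subseq hpre
  rw [portA_eq_mc sequence subseq hpre]
  unfold simpleSubseqMatch_alt
  rw [show PySem.Chars.find sequence.toList subseq.toList
      = PySem.Chars.findFrom sequence.toList subseq.toList ((0 : Nat) : Int) none by
    simp [PySem.Chars.findFrom_zero]]
  rw [altGo_eq sequence.toList subseq.toList hsub' (sequence.toList.length + 2) 0 0
    (Nat.zero_le _) (by have := mc_le sequence.toList subseq.toList 0; omega)]
  simp
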